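-- pv_equiv track=rewrite | github.com/gabrielreiter/PokemonDecksIA | DeckScrapping.py | get_clean_decklist
-- ===== SOURCE A (Python) =====
-- def get_clean_decklist(data):
--     # Split the decklist into Pokemon, Trainer and Energy. Then remove Energy.
--     card_list = data.split('\n\n')[:2]
--     # Remove the first element of each list and separates the cards.
--     card_list = [x.split('\n')[1:] for x in card_list]
--     # join the both lists (append one into other)
--     card_list = card_list[0] + card_list[1]
--     # split each element by the ' '
--     card_list = [x.split(' ') for x in card_list]
--     # get the last two elements of each list
--     card_list = [x[-2:] for x in card_list]
--     # if the second element has just 2 characters, put a 0 in front of it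
--     card_list = [[x[0], '0' + x[1]] if len(x[1]) == 2 else x for x in card_list]
--     # join the elements of each list (append one into other)
--     card_list = [x[0] + x[1] for x in card_list]
--
--     return card_list
-- ===== SOURCE B (Python) =====
-- def _card_code(line):
--     # Scan the line backwards character by character: collect the set number,
--     # skip one space, collect the card name token. No tokenization.
--     k = len(line) - 1
--     num = ''
--     while k >= 0 and line[k] != ' ':
--         num = line[k] + num
--         k -= 1
--     k -= 1
--     name = ''
--     while k >= 0 and line[k] != ' ':
--         name = line[k] + name
--         k -= 1
--     if len(num) == 2:
--         num = '0' + num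
--     return name + num
--
--
-- def get_clean_decklist(data):
--     # Per-card character-level backward scan instead of A's seven whole-list
--     # passes; headers are dropped by cutting at the first newline via find.
--     pokemon, trainer = data.split('\n\n')[:2]
--     result = []
--     for sec in (pokemon, trainer):
--         nl = sec.find('\n')
--         if nl == -1:
--             continue
--         for line in sec[nl + 1:].split('\n'):
--             result.append(_card_code(line))
--     return result
-- ===== Notes on version B (the rewrite author's own statement) =====
-- stated objective: alternative
-- what changed: Replaces A's tokenize-everything pipeline (split each line into a token list, slice the last two, pad, rejoin, over seven whole-list passes) with a per-line backward character scan that collects the number and name tokens directly, and drops each section header by cutting at the first newline found instead of list slicing.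
import Mathlib
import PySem

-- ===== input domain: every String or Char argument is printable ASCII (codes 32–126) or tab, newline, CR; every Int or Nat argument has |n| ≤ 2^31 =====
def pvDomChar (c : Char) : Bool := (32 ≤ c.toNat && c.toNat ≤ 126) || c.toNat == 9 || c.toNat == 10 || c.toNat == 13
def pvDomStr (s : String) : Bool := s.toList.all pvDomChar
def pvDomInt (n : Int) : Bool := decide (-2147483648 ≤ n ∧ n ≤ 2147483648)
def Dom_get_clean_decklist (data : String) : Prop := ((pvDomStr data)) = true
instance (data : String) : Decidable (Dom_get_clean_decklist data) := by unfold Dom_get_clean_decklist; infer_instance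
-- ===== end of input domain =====

-- B parses each card line by a backward character scan (no token lists) and drops each
-- section header by cutting at the first newline found; alternative decomposition, same O(n) cost.

-- ===== PORT A =====
-- A, step for step: split into sections, take 2, drop headers, concatenate, then five list passes.
def get_clean_decklist (data : String) : List String :=
  let card_list := PySem.List.slice ((PySem.Str.split? data "\n\n").getD []) none (some 2)
  let card_list := card_list.map (fun x => PySem.List.slice ((PySem.Str.split? x "\n").getD []) (some 1) none)
  let card_list := PySem.List.pyGetD card_list 0 [] ++ PySem.List.pyGetD card_list 1 []
  let card_list := card_list.map (fun x => (PySem.Str.split? x " ").getD [])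
  let card_list := card_list.map (fun x => PySem.List.slice x (some (-2)) none)
  let card_list := card_list.map (fun x =>
    if PySem.Str.len (PySem.List.pyGetD x 1 "") = 2 then
      [PySem.List.pyGetD x 0 "", "0" ++ PySem.List.pyGetD x 1 ""] else x)
  let card_list := card_list.map (fun x => PySem.List.pyGetD x 0 "" ++ PySem.List.pyGetD x 1 "")
  card_list

-- ===== PORT B =====
-- B-side helper: the backward while-loop 'collect chars until a space' of _card_code, as
-- structural recursion over the reversed character list (acc = the token built so far).
def pvScanTok : List Char → List Char → List Char × List Char
  | acc, [] => (acc, [])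
  | acc, c :: rest => if c = ' ' then (acc, c :: rest) else pvScanTok (c :: acc) rest

-- B-side helper: _card_code — scan backwards for the number, skip the space, scan for the name.
def pvCardCode (line : String) : String :=
  let rcs := line.toList.reverse
  let sc1 := pvScanTok [] rcs
  let num := sc1.1
  let r2 := sc1.2.drop 1
  let name := (pvScanTok [] r2).1
  let num := if num.length = 2 then '0' :: num else num
  String.ofList (name ++ num)

def get_clean_decklist_alt (data : String) : List String :=
  -- 'pokemon, trainer = ...[:2]' — Python raises ValueError unless exactly two; the
  -- catch-all branch is that raise (unreachable inside Pre_).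
  match PySem.List.slice ((PySem.Str.split? data "\n\n").getD []) none (some 2) with
  | [pokemon, trainer] =>
  ([pokemon, trainer]).foldl
    (fun acc sec =>
      let nl := PySem.Str.find sec "\n"
      if nl = -1 then acc
      else ((PySem.Str.split? (PySem.Str.slice sec (some (nl + 1)) none) "\n").getD []).foldl
        (fun acc2 line => acc2 ++ [pvCardCode line]) acc)
    []
  | _ => []

-- ===== PRECONDITION & SPEC =====
-- Pre_ excludes exactly the inputs where A raises IndexError: fewer than two
-- blank-line-separated sections (card_list[1]), or a card line without a space,
-- i.e. with fewer than two space-separated tokens (x[1] after x[-2:]).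
def Pre_get_clean_decklist (data : String) : Prop :=
  let secs := PySem.List.slice ((PySem.Str.split? data "\n\n").getD []) none (some 2)
  secs.length = 2 ∧
    ∀ s ∈ secs, ∀ line ∈ ((PySem.Str.split? s "\n").getD []).tail,
      PySem.Str.isIn " " line = true
instance (data : String) : Decidable (Pre_get_clean_decklist data) := by
  unfold Pre_get_clean_decklist; infer_instance
def pvWitness_get_clean_decklist : String := "Pokemon\nA B 12\n\nTrainer\nC D 123"

def Spec_get_clean_decklist (data : String) (out : List String) : Prop := out = get_clean_decklist_alt data
instance (data : String) (out : List String) : Decidable (Spec_get_clean_decklist data out) := by unfold Spec_get_clean_decklist; infer_instance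

-- ===== CLAIM (what is proved, stated in full; the proofs are below) =====
def Claim_equal_get_clean_decklist : Prop := ∀ (data : String), Dom_get_clean_decklist data → Pre_get_clean_decklist data → Spec_get_clean_decklist data (get_clean_decklist data)
-- ===== LEMMAS AND PROOFS =====

-- Reference form of Python's str.split for a ONE-character separator.
def pvSp (c : Char) : List Char → List (List Char)
  | [] => [[]]
  | x :: rest =>
      if x = c then [] :: pvSp c rest
      else match pvSp c rest with
        | [] => [[x]]
        | t :: ts => (x :: t) :: ts

lemma pvSp_ne_nil (c : Char) (l : List Char) : pvSp c l ≠ [] := by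
  cases l with
  | nil => simp [pvSp]
  | cons x rest =>
    simp only [pvSp]
    split_ifs
    · simp
    · cases h : pvSp c rest <;> simp

lemma go_sp (c : Char) : ∀ (fuel : Nat) (l cur : List Char) (acc : List (List Char)),
    l.length < fuel →
    PySem.Chars.splitOn.go [c] fuel l cur acc
      = acc.reverse ++ (match pvSp c l with
          | [] => [cur.reverse]
          | t :: ts => (cur.reverse ++ t) :: ts) := by
  intro fuel
  induction fuel with
  | zero => intro l cur acc h; omega
  | succ fuel ih =>
    intro l cur acc h
    cases l with
    | nil =>
      rw [PySem.Chars.splitOn.go]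
      simp [pvSp]
      omega
    | cons x rest =>
      by_cases hx : x = c
      · subst hx
        rw [PySem.Chars.splitOn.go]
        simp only [List.isPrefixOf, BEq.rfl, Bool.true_and,
          List.length_singleton, List.drop_one, List.tail_cons, if_pos]
        rw [ih rest [] (cur.reverse :: acc) (by simpa using Nat.lt_of_succ_lt_succ h)]
        simp only [pvSp]
        cases hs : pvSp x rest with
        | nil => exact absurd hs (pvSp_ne_nil x rest)
        | cons t ts => simp
      · rw [PySem.Chars.splitOn.go]
        simp only [List.isPrefixOf, Bool.and_true]
        rw [if_neg (by simp; exact fun h' => hx h'.symm)]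
        rw [ih rest (x :: cur) acc (by simpa using Nat.lt_of_succ_lt_succ h)]
        simp only [pvSp, if_neg hx]
        cases hs : pvSp c rest with
        | nil => exact absurd hs (pvSp_ne_nil c rest)
        | cons t ts => simp

lemma splitOn_eq_sp (c : Char) (l : List Char) :
    PySem.Chars.splitOn l [c] = pvSp c l := by
  unfold PySem.Chars.splitOn
  rw [go_sp c (l.length + 1) l [] [] (by omega)]
  cases hs : pvSp c l with
  | nil => exact absurd hs (pvSp_ne_nil c l)
  | cons t ts => simp

lemma sp_no (c : Char) (l : List Char) (h : c ∉ l) : pvSp c l = [l] := by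
  induction l with
  | nil => rfl
  | cons x rest ih =>
    simp only [List.mem_cons, not_or] at h
    have hx : ¬ (x = c) := fun hh => h.1 hh.symm
    simp only [pvSp, if_neg hx, ih h.2]

lemma sp_append (c : Char) (u v : List Char) :
    pvSp c (u ++ c :: v) = pvSp c u ++ pvSp c v := by
  induction u with
  | nil => simp [pvSp]
  | cons x rest ih =>
    by_cases hx : x = c
    · simp only [List.cons_append, pvSp, if_pos hx, ih]
    · simp only [List.cons_append, pvSp, if_neg hx, ih]
      cases hs : pvSp c rest with
      | nil => exact absurd hs (pvSp_ne_nil c rest)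
      | cons t ts => simp

-- tokens under a one-character separator, through the characterization
lemma split_getD (s : String) (c : Char) (sep : String) (hs : sep.toList = [c]) :
    (PySem.Str.split? s sep).getD [] = (pvSp c s.toList).map String.ofList := by
  simp [PySem.Str.split?, PySem.Chars.split?, hs, splitOn_eq_sp]

-- the backward while-loop in closed form
lemma scanTok_eq (l : List Char) : ∀ acc,
    pvScanTok acc l = ((l.takeWhile (fun x => x != ' ')).reverse ++ acc,
      l.dropWhile (fun x => x != ' ')) := by
  induction l with
  | nil => intro acc; simp [pvScanTok]
  | cons x rest ih =>
    intro acc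
    by_cases hx : x = ' '
    · subst hx; simp [pvScanTok, List.takeWhile, List.dropWhile]
    · simp only [pvScanTok, if_neg hx, ih, List.takeWhile, List.dropWhile]
      have : (x != ' ') = true := by simpa using hx
      simp [this]

lemma tw_nospace (xs ys : List Char) (h : (' ':Char) ∉ xs) :
    (xs ++ ' ' :: ys).takeWhile (fun x => x != ' ') = xs := by
  induction xs with
  | nil => simp
  | cons a t ih =>
    simp only [List.mem_cons, not_or] at h
    simp [(by simpa using fun e => h.1 e.symm : a ≠ ' '), ih h.2]

lemma dw_nospace (xs ys : List Char) (h : (' ':Char) ∉ xs) :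
    (xs ++ ' ' :: ys).dropWhile (fun x => x != ' ') = ' ' :: ys := by
  induction xs with
  | nil => simp
  | cons a t ih =>
    simp only [List.mem_cons, not_or] at h
    simp [(by simpa using fun e => h.1 e.symm : a ≠ ' '), ih h.2]

lemma tw_all (xs : List Char) (h : (' ':Char) ∉ xs) :
    xs.takeWhile (fun x => x != ' ') = xs := by
  rw [List.takeWhile_eq_self_iff]
  intro x hx
  simp only [bne_iff_ne, ne_eq]
  intro he; exact h (he ▸ hx)

-- decomposition at the LAST space of a list
lemma split_at_last_space (cs : List Char) (h : (' ':Char) ∈ cs) :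
    ∃ u v : List Char, cs = u ++ ' ' :: v ∧ (' ':Char) ∉ v := by
  have h' : (' ':Char) ∈ cs.reverse := List.mem_reverse.mpr h
  set a := cs.reverse.takeWhile (fun x => x != ' ') with ha
  set d := cs.reverse.dropWhile (fun x => x != ' ') with hd
  have hdne : d ≠ [] := by
    intro hnil
    have hta : cs.reverse = a := by
      rw [← List.takeWhile_append_dropWhile (p := fun x => x != ' ') (l := cs.reverse), ← hd, hnil,
        List.append_nil, ha]
    rw [hta] at h'
    have := List.mem_takeWhile_imp h'
    simp at this
  have hhead : d.head hdne = ' ' := by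
    have := List.head_dropWhile_not (p := fun x => x != ' ') (l := cs.reverse) (by rw [← hd]; exact hdne)
    simpa [← hd] using this
  have hrcs : cs.reverse = a ++ ' ' :: d.tail := by
    conv_lhs => rw [← List.takeWhile_append_dropWhile (p := fun x => x != ' ') (l := cs.reverse)]
    rw [← ha, ← hd]
    congr 1
    rw [← hhead]
    exact (List.cons_head_tail hdne).symm
  refine ⟨d.tail.reverse, a.reverse, ?_, ?_⟩
  · have := congrArg List.reverse hrcs
    simpa [List.reverse_append] using this
  · intro hc
    have := List.mem_takeWhile_imp (l := cs.reverse) (p := fun x => x != ' ') (by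
      rw [← ha]; exact List.mem_reverse.mp hc)
    simp at this

-- A's per-line processing (passes 4–7 applied to one line)
def pvALine (line : String) : String :=
  (fun x => PySem.List.pyGetD x 0 "" ++ PySem.List.pyGetD x 1 "")
    ((fun x => if PySem.Str.len (PySem.List.pyGetD x 1 "") = 2 then
        [PySem.List.pyGetD x 0 "", "0" ++ PySem.List.pyGetD x 1 ""] else x)
      (PySem.List.slice ((PySem.Str.split? line " ").getD []) (some (-2)) none))

lemma slice_neg_two {α : Type} (l : List α) (a b : α) :
    PySem.List.slice (l ++ [a, b]) (some (-2)) none = [a, b] := by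
  simp [PySem.List.slice]

lemma pyGetD_pair_0 (x y : String) : PySem.List.pyGetD [x, y] 0 "" = x := by
  simp [PySem.List.pyGetD, PySem.List.pyGet?, PySem.List.pyIdx?]

lemma pyGetD_pair_1 (x y : String) : PySem.List.pyGetD [x, y] 1 "" = y := by
  simp [PySem.List.pyGetD, PySem.List.pyGet?, PySem.List.pyIdx?]

-- A's padding-and-joining passes applied to one token pair
lemma pad_join (w v : List Char) :
    (fun x => PySem.List.pyGetD x 0 "" ++ PySem.List.pyGetD x 1 "")
      ((fun x => if PySem.Str.len (PySem.List.pyGetD x 1 "") = 2 then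
          [PySem.List.pyGetD x 0 "", "0" ++ PySem.List.pyGetD x 1 ""] else x)
        [String.ofList w, String.ofList v])
    = String.ofList (w ++ if v.length = 2 then '0' :: v else v) := by
  have hl : PySem.Str.len (String.ofList v) = (v.length : Int) := by simp [PySem.Str.len]
  simp only [pyGetD_pair_0, pyGetD_pair_1, hl]
  by_cases hv : v.length = 2
  · rw [if_pos (show ((v.length : Int) = 2) by exact_mod_cast hv), if_pos hv]
    simp only [pyGetD_pair_0, pyGetD_pair_1]
    rw [show ("0" : String) = String.ofList ['0'] from rfl, ← String.ofList_append,
      ← String.ofList_append]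
    simp
  · rw [if_neg (show ¬ ((v.length : Int) = 2) by exact_mod_cast hv), if_neg hv]
    simp only [pyGetD_pair_0, pyGetD_pair_1]
    rw [← String.ofList_append]

-- per-line agreement: on a line containing a space, A's token passes equal B's backward scan
lemma line_eq (line : String) (h : (' ' : Char) ∈ line.toList) :
    pvALine line = pvCardCode line := by
  obtain ⟨u, v, hcs, hv⟩ := split_at_last_space line.toList h
  have hvrev : (' ':Char) ∉ v.reverse := fun hc => hv (List.mem_reverse.mp hc)
  -- B's two scans
  have hrev : line.toList.reverse = v.reverse ++ ' ' :: u.reverse := by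
    rw [hcs]; simp [List.reverse_append]
  have hB : pvCardCode line
      = String.ofList ((u.reverse.takeWhile (fun x => x != ' ')).reverse
          ++ if v.length = 2 then '0' :: v else v) := by
    simp only [pvCardCode]
    rw [hrev, scanTok_eq (v.reverse ++ ' ' :: u.reverse) []]
    simp only [tw_nospace _ _ hvrev, dw_nospace _ _ hvrev, List.append_nil,
      List.drop_one, List.tail_cons]
    rw [scanTok_eq u.reverse []]
    simp
  -- A's token list
  have htok : (PySem.Str.split? line " ").getD []
      = (pvSp ' ' u).map String.ofList ++ [String.ofList v] := by
    rw [split_getD line ' ' " " rfl, hcs, sp_append, sp_no ' ' v hv]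
    simp
  by_cases hu : (' ':Char) ∈ u
  · obtain ⟨u', w, hu', hw⟩ := split_at_last_space u hu
    have hwrev : (' ':Char) ∉ w.reverse := fun hc => hw (List.mem_reverse.mp hc)
    have hsp : pvSp ' ' u = pvSp ' ' u' ++ [w] := by
      rw [hu', sp_append, sp_no ' ' w hw]
    have hurev : u.reverse = w.reverse ++ ' ' :: u'.reverse := by
      rw [hu']; simp [List.reverse_append]
    rw [hB, hurev, tw_nospace _ _ hwrev, List.reverse_reverse]
    unfold pvALine
    rw [htok, hsp]
    rw [show (pvSp ' ' u' ++ [w]).map String.ofList ++ [String.ofList v]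
        = (pvSp ' ' u').map String.ofList ++ [String.ofList w, String.ofList v] by simp]
    rw [slice_neg_two]
    exact pad_join w v
  · rw [hB, tw_all _ (fun hc => hu (List.mem_reverse.mp hc)), List.reverse_reverse]
    unfold pvALine
    rw [htok, sp_no ' ' u hu]
    rw [show ([u] : List (List Char)).map String.ofList ++ [String.ofList v]
        = ([] : List String) ++ [String.ofList u, String.ofList v] by simp]
    rw [slice_neg_two]
    exact pad_join u v

-- B's per-section line list equals A's split-then-drop-first
lemma sec_lines (s : String) :
    (if PySem.Str.find s "\n" = -1 then ([] : List String)
     else (PySem.Str.split? (PySem.Str.slice s (some (PySem.Str.find s "\n" + 1)) none) "\n").getD [])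
    = ((PySem.Str.split? s "\n").getD []).tail := by
  have hfind : PySem.Str.find s "\n" = PySem.Chars.find s.toList ['\n'] := rfl
  by_cases h : PySem.Str.find s "\n" = -1
  · have hnin : ('\n':Char) ∉ s.toList := by
      intro hc
      have := (PySem.Chars.find_eq_neg_one_iff (s := s.toList) (sub := ['\n'])).mp (hfind ▸ h)
      exact this ((List.singleton_infix_iff '\n' s.toList).mpr hc)
    rw [if_pos h, split_getD s '\n' "\n" rfl, sp_no '\n' s.toList hnin]
    simp
  · have hge : 0 ≤ PySem.Chars.find s.toList ['\n'] := by
      have h1 := PySem.Chars.neg_one_le_find (s := s.toList) (sub := ['\n'])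
      rw [hfind] at h
      omega
    obtain ⟨hpre, hmin⟩ := PySem.Chars.find_spec (s := s.toList) (sub := ['\n']) hge
    set n := (PySem.Chars.find s.toList ['\n']).toNat with hn
    have hlt : n < s.toList.length := by
      have hlen1 := hpre.length_le
      simp only [List.length_drop, List.length_cons, List.length_nil] at hlen1
      omega
    have hdropn : s.toList.drop n = '\n' :: s.toList.drop (n + 1) := by
      have hpre' : ['\n'] <+: s.toList[n] :: s.toList.drop (n + 1) := by
        rw [← List.drop_eq_getElem_cons hlt]; exact hpre
      have hx := (List.cons_prefix_cons.mp hpre').1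
      rw [List.drop_eq_getElem_cons hlt, ← hx]
    have hcs : s.toList = s.toList.take n ++ '\n' :: s.toList.drop (n + 1) := by
      conv_lhs => rw [← List.take_append_drop n s.toList]
      rw [hdropn]
    have hnin : ('\n':Char) ∉ s.toList.take n := by
      intro hc
      obtain ⟨j, hjlen, hje⟩ := List.getElem_of_mem hc
      have hj2 : j < n ∧ j < s.length := by simpa using hjlen
      have hjlen' : j < s.toList.length := by simpa using hj2.2
      apply hmin j hj2.1
      rw [List.drop_eq_getElem_cons hjlen']
      have hgj : s.toList[j] = '\n' := by
        rw [← List.getElem_take (h := hjlen)]; exact hje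
      rw [hgj]
      exact ⟨s.toList.drop (j+1), rfl⟩
    rw [if_neg h]
    have hslice : PySem.Str.slice s (some (PySem.Str.find s "\n" + 1)) none
        = String.ofList (s.toList.drop (n + 1)) := by
      rw [hfind]
      have h1 : (0:Int) ≤ PySem.Chars.find s.toList ['\n'] + 1 := by omega
      have h2 : (PySem.Chars.find s.toList ['\n'] + 1).toNat = n + 1 := by omega
      simp only [PySem.Str.slice, PySem.Chars.slice_eq_listSlice]
      rw [PySem.List.slice_from _ h1, h2]
    rw [hslice]
    have hofl : (PySem.Str.split? (String.ofList (s.toList.drop (n+1))) "\n").getD []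
        = (pvSp '\n' (s.toList.drop (n+1))).map String.ofList := by
      rw [split_getD _ '\n' "\n" rfl, String.toList_ofList]
    rw [hofl, split_getD s '\n' "\n" rfl]
    conv_rhs => rw [hcs]
    rw [sp_append, sp_no '\n' _ hnin]
    simp

-- per-section step of B's fold
lemma sec_step (acc : List String) (sec : String) :
    (let nl := PySem.Str.find sec "\n"
     if nl = -1 then acc
     else ((PySem.Str.split? (PySem.Str.slice sec (some (nl + 1)) none) "\n").getD []).foldl
       (fun acc2 line => acc2 ++ [pvCardCode line]) acc)
    = acc ++ (((PySem.Str.split? sec "\n").getD []).tail).map pvCardCode := by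
  by_cases h : PySem.Str.find sec "\n" = -1
  · have hl : ((PySem.Str.split? sec "\n").getD []).tail = [] := by
      rw [← sec_lines, if_pos h]
    dsimp only
    rw [if_pos h, hl]
    simp
  · have hl : (PySem.Str.split? (PySem.Str.slice sec (some (PySem.Str.find sec "\n" + 1)) none)
        "\n").getD [] = ((PySem.Str.split? sec "\n").getD []).tail := by
      rw [← sec_lines, if_neg h]
    dsimp only
    rw [if_neg h, PySem.List.foldl_append_singleton_eq_map, hl]

-- ===== VERDICT (by name: the statement is the Claim_ definition above) =====
set_option maxHeartbeats 1000000 in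
theorem get_clean_decklist_spec : Claim_equal_get_clean_decklist := by
  intro data _ hpre
  obtain ⟨hlen, hlines⟩ := hpre
  unfold Spec_get_clean_decklist get_clean_decklist get_clean_decklist_alt
  obtain ⟨s0, s1, h2⟩ := List.length_eq_two.mp hlen
  rw [h2]
  simp only [List.map_cons, List.map_nil, List.foldl_cons, List.foldl_nil]
  rw [sec_step, sec_step]
  rw [show PySem.List.pyGetD
        [PySem.List.slice ((PySem.Str.split? s0 "\n").getD []) (some 1) none,
         PySem.List.slice ((PySem.Str.split? s1 "\n").getD []) (some 1) none] (0 : Int)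
        ([] : List String)
      = PySem.List.slice ((PySem.Str.split? s0 "\n").getD []) (some 1) none from rfl,
     show PySem.List.pyGetD
        [PySem.List.slice ((PySem.Str.split? s0 "\n").getD []) (some 1) none,
         PySem.List.slice ((PySem.Str.split? s1 "\n").getD []) (some 1) none] (1 : Int)
        ([] : List String)
      = PySem.List.slice ((PySem.Str.split? s1 "\n").getD []) (some 1) none from rfl]
  rw [PySem.List.slice_from_one, PySem.List.slice_from_one]
  simp only [List.map_map, List.nil_append, List.map_append]
  have hmap : ∀ s ∈ [s0, s1],
      (((PySem.Str.split? s "\n").getD []).tail).map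
          ((fun x => PySem.List.pyGetD x 0 "" ++ PySem.List.pyGetD x 1 "") ∘
            (fun x => if PySem.Str.len (PySem.List.pyGetD x 1 "") = 2 then
                [PySem.List.pyGetD x 0 "", "0" ++ PySem.List.pyGetD x 1 ""] else x) ∘
            (fun x => PySem.List.slice x (some (-2)) none) ∘
            (fun x => (PySem.Str.split? x " ").getD []))
        = (((PySem.Str.split? s "\n").getD []).tail).map pvCardCode := by
    intro s hs
    apply List.map_congr_left
    intro line hline
    have hsp : PySem.Str.isIn " " line = true := hlines s (h2 ▸ hs) line hline
    have hmem : (' ':Char) ∈ line.toList := by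
      have := (PySem.Str.isIn_iff_infix (sub := " ") (s := line)).mp hsp
      exact (List.singleton_infix_iff ' ' line.toList).mp (by simpa using this)
    have := line_eq line hmem
    unfold pvALine at this
    simpa [Function.comp] using this
  rw [hmap s0 (by simp), hmap s1 (by simp)]
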